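-- pv_equiv track=rewrite | github.com/angelusualle/algorithms | cracking_the_coding_interview_qs/17.8/double_index_max_subsequence.py | double_index_max_subsequence
-- ===== SOURCE A (Python) =====
-- def double_index_max_subsequence(indices):
--     indices.sort(key=lambda x: x[0])
--     subsequences = {}
--     for i, item in enumerate(indices):
--         best = [item]
--         max_len_term = 1
--         for end in subsequences:
--             if subsequences[end][-1][1] <= item[1]:
--                 base_seq = subsequences[end][:]
--                 if len(base_seq) + 1 > max_len_term:
--                     base_seq.append(item)
--                     best = base_seq
--                     max_len_term = len(base_seq)
--         subsequences[i] = best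
--     best = None
--     best_len = float("-inf")
--     for s in subsequences:
--         if len(subsequences[s]) > best_len:
--             best = subsequences[s]
--             best_len = len(subsequences[s])
--     return best
-- ===== SOURCE B (Python) =====
-- def double_index_max_subsequence(indices):
--     # O(n^2) DP with lengths + predecessor pointers; reconstructs the chain once.
--     # Sorts `indices` in place, like the original.
--     indices.sort(key=lambda x: x[0])
--     n = len(indices)
--     if n == 0:
--         return []
--     lens = [1] * n
--     pred = [-1] * n
--     for i in range(n):
--         for j in range(i):
--             if indices[j][1] <= indices[i][1] and lens[j] + 1 > lens[i]:
--                 lens[i] = lens[j] + 1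
--                 pred[i] = j
--     best = 0
--     for i in range(n):
--         if lens[i] > lens[best]:
--             best = i
--     out = []
--     k = best
--     while k != -1:
--         out.append(indices[k])
--         k = pred[k]
--     out.reverse()
--     return out
-- ===== Notes on version B (the rewrite author's own statement) =====
-- stated objective: faster
-- what changed: Replaces the dict of full chain copies (each inner step slices and appends whole lists) by an O(n^2) DP over integer lengths and predecessor pointers, reconstructing the single winning chain once at the end.
-- outside the precondition, e.g. on double_index_max_subsequence([]): A returns None, B returns []
import Mathlib
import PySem

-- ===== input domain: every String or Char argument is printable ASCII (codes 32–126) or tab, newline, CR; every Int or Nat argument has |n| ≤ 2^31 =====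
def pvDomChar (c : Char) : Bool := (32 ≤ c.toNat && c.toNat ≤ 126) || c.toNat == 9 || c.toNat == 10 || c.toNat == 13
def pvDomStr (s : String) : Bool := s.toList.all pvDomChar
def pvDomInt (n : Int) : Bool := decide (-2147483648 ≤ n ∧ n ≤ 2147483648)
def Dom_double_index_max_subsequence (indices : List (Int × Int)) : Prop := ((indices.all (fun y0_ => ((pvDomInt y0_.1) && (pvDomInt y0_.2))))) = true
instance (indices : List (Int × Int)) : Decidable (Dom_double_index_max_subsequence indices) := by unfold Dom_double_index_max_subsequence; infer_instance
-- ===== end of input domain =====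

-- B replaces A's dict of full chain copies by an O(n^2) length/predecessor DP with a single
-- final reconstruction (measured faster). Both A and B sort `indices` in place in Python; the
-- equivalence proved here is about the return value.


-- ===== PORT A =====
-- A-side helpers: the three loop bodies of A, as named step functions
def dimsAInner (item : Int × Int) (s : List (Int × Int) × Int) (kv : Int × List (Int × Int)) :
    List (Int × Int) × Int :=
  match PySem.List.pyGet? kv.2 (-1) with  -- subsequences[end][-1]; stored chains are never empty
  | some last =>
    if last.2 ≤ item.2 then
      if ((kv.2.length : Int)) + 1 > s.2 then (kv.2 ++ [item], ((kv.2 ++ [item]).length : Int))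
      else s
    else s
  | none => s

-- body of 'for i, item in enumerate(indices)'; the inner 'for end in subsequences' reads the
-- dict's keys in insertion order with subsequences[end]: folded as d.items
def dimsAStep (d : PySem.Dict Int (List (Int × Int))) (p : Int × (Int × Int)) :
    PySem.Dict Int (List (Int × Int)) :=
  d.insert p.1 (d.items.foldl (dimsAInner p.2) ([p.2], 1)).1

-- body of the final scan (first chain of maximal length); float('-inf') modelled as none
def dimsAFin (s : Option (List (Int × Int)) × Option Int) (kv : Int × List (Int × Int)) :
    Option (List (Int × Int)) × Option Int :=
  if (match s.2 with | none => true | some b => decide (((kv.2.length : Int)) > b)) then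
    (some kv.2, some ((kv.2.length : Int)))
  else s

def double_index_max_subsequence (indices : List (Int × Int)) : List (Int × Int) :=
  let a := PySem.List.sorted indices (fun x => x.1)   -- indices.sort(key=lambda x: x[0])
  let d := (PySem.List.enumerate a).foldl dimsAStep PySem.Dict.empty
  let fin := d.items.foldl dimsAFin (none, none)
  fin.1.getD []  -- Python A returns None when indices is empty; such inputs are outside Pre_

-- ===== PORT B =====
-- B-side helpers: loop bodies of Source B, as named step functions
def dimsBInner (a : List (Int × Int)) (i : Nat) (lp : List Int × List Int) (j : Nat) :
    List Int × List Int :=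
  if (a.getD j (0, 0)).2 ≤ (a.getD i (0, 0)).2 ∧ lp.1.getD j 0 + 1 > lp.1.getD i 0 then
    (lp.1.set i (lp.1.getD j 0 + 1), lp.2.set i (j : Int))
  else lp

def dimsBOuter (a : List (Int × Int)) (lp : List Int × List Int) (i : Nat) : List Int × List Int :=
  (List.range i).foldl (dimsBInner a i) lp

def dimsBBest (lens : List Int) (b i : Nat) : Nat :=
  if lens.getD i 0 > lens.getD b 0 then i else b

-- the `while k != -1` pointer walk of Source B (called with fuel = n, always enough: pred[k] < k)
def dimsWalk (a : List (Int × Int)) (pred : List Int) : Nat → Int → List (Int × Int) → List (Int × Int)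
  | 0, _, acc => acc
  | fuel+1, k, acc =>
    if k = -1 then acc
    else dimsWalk a pred fuel (pred.getD k.toNat (-1)) (acc ++ [a.getD k.toNat (0, 0)])

def double_index_max_subsequence_alt (indices : List (Int × Int)) : List (Int × Int) :=
  let a := PySem.List.sorted indices (fun x => x.1)
  let n := a.length
  if n = 0 then []
  else
    let lp := (List.range n).foldl (dimsBOuter a) (List.replicate n 1, List.replicate n (-1))
    let best := (List.range n).foldl (dimsBBest lp.1) 0
    (dimsWalk a lp.2 n (best : Int) []).reverse

-- ===== PRECONDITION & SPEC =====
-- Pre_ excludes only the empty list, on which Python A returns None instead of a list.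
def Pre_double_index_max_subsequence (indices : List (Int × Int)) : Prop := indices ≠ []
instance (indices : List (Int × Int)) : Decidable (Pre_double_index_max_subsequence indices) := by unfold Pre_double_index_max_subsequence; infer_instance

def pvWitness_double_index_max_subsequence : (List (Int × Int)) := [(0, 0)]

def Spec_double_index_max_subsequence (indices : List (Int × Int)) (out : List (Int × Int)) : Prop := out = double_index_max_subsequence_alt indices
instance (indices : List (Int × Int)) (out : List (Int × Int)) : Decidable (Spec_double_index_max_subsequence indices out) := by unfold Spec_double_index_max_subsequence; infer_instance

-- ===== CLAIM (what is proved, stated in full; the proofs are below) =====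
def Claim_equal_double_index_max_subsequence : Prop := ∀ (indices : List (Int × Int)), Dom_double_index_max_subsequence indices → Pre_double_index_max_subsequence indices → Spec_double_index_max_subsequence indices (double_index_max_subsequence indices)

-- ===== LEMMAS AND PROOFS =====

-- shared model over the sorted list `a`
def dA (a : List (Int × Int)) (j : Nat) : Int × Int := a.getD j (0, 0)

def dimsSel (a : List (Int × Int)) (L : Nat → Int) (i : Nat) : Int × Int :=
  (List.range i).foldl
    (fun s j => if (dA a j).2 ≤ (dA a i).2 ∧ L j + 1 > s.1 then (L j + 1, (j : Int)) else s)
    (1, -1)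

def dimsC (a : List (Int × Int)) : Nat → List (List (Int × Int))
  | 0 => []
  | i+1 =>
    let cs := dimsC a i
    let s := dimsSel a (fun j => ((cs.getD j []).length : Int)) i
    cs ++ [if s.2 = -1 then [dA a i] else cs.getD s.2.toNat [] ++ [dA a i]]

def Cc (a : List (Int × Int)) (j : Nat) : List (Int × Int) := (dimsC a (j+1)).getD j []
def Lm (a : List (Int × Int)) (j : Nat) : Int := ((Cc a j).length : Int)
def selC (a : List (Int × Int)) (i : Nat) : Int × Int := dimsSel a (Lm a) i
def bidx (a : List (Int × Int)) (k : Nat) : Nat :=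
  (List.range k).foldl (fun b i => if Lm a i > Lm a b then i else b) 0

theorem dimsC_succ (a : List (Int × Int)) (i : Nat) :
    dimsC a (i+1) = dimsC a i ++
      [if (dimsSel a (fun j => (((dimsC a i).getD j []).length : Int)) i).2 = -1
       then [dA a i]
       else (dimsC a i).getD (dimsSel a (fun j => (((dimsC a i).getD j []).length : Int)) i).2.toNat []
            ++ [dA a i]] := rfl

theorem length_dimsC (a : List (Int × Int)) (i : Nat) : (dimsC a i).length = i := by
  induction i with
  | zero => rfl
  | succ i ih => rw [dimsC_succ]; simp [ih]

theorem getD_dimsC (a : List (Int × Int)) {j i : Nat} (h : j < i) :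
    (dimsC a i).getD j [] = Cc a j := by
  induction i with
  | zero => omega
  | succ i ih =>
    rcases Nat.lt_succ_iff_lt_or_eq.mp h with h' | rfl
    · rw [dimsC_succ, List.getD_append _ _ _ _ (by rw [length_dimsC]; exact h'), ih h']
    · rfl

-- generic: fold a concrete loop through an abstraction F of its state
theorem foldl_hom_mem {α β γ : Type} (F : β → γ) (g : γ → α → γ) (m : β → α → β)
    (l : List α) (P : α → Prop) (hl : ∀ x ∈ l, P x)
    (hstep : ∀ s x, P x → g (F s) x = F (m s x)) (s0 : β) :
    l.foldl g (F s0) = F (l.foldl m s0) := by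
  induction l generalizing s0 with
  | nil => rfl
  | cons x xs ih =>
    simp only [List.foldl_cons]
    rw [hstep s0 x (hl x (List.mem_cons_self))]
    exact ih (fun y hy => hl y (List.mem_cons_of_mem _ hy)) _

-- invariant of the selection fold: the running (length, pred) pair is consistent
theorem sel_inv_aux (a : List (Int × Int)) (L : Nat → Int) (i : Nat)
    (l : List Nat) (hl : ∀ j ∈ l, j < i) (s : Int × Int)
    (hs : (s.2 = -1 ∧ s.1 = 1) ∨ (0 ≤ s.2 ∧ s.2.toNat < i ∧ s.1 = L s.2.toNat + 1)) :
    (let r := l.foldl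
      (fun s j => if (dA a j).2 ≤ (dA a i).2 ∧ L j + 1 > s.1 then (L j + 1, (j : Int)) else s) s
     (r.2 = -1 ∧ r.1 = 1) ∨ (0 ≤ r.2 ∧ r.2.toNat < i ∧ r.1 = L r.2.toNat + 1)) := by
  induction l generalizing s with
  | nil => exact hs
  | cons x xs ih =>
    simp only [List.foldl_cons]
    apply ih (fun y hy => hl y (List.mem_cons_of_mem _ hy))
    split
    · right
      refine ⟨by positivity, ?_, by simp⟩
      simpa using hl x List.mem_cons_self
    · exact hs

theorem sel_inv (a : List (Int × Int)) (L : Nat → Int) (i : Nat) :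
    ((dimsSel a L i).2 = -1 ∧ (dimsSel a L i).1 = 1) ∨
      (0 ≤ (dimsSel a L i).2 ∧ (dimsSel a L i).2.toNat < i ∧
       (dimsSel a L i).1 = L (dimsSel a L i).2.toNat + 1) := by
  exact sel_inv_aux a L i (List.range i) (fun j hj => List.mem_range.mp hj) (1, -1) (Or.inl ⟨rfl, rfl⟩)

theorem sel_dimsC (a : List (Int × Int)) (i : Nat) :
    dimsSel a (fun j => (((dimsC a i).getD j []).length : Int)) i = selC a i := by
  unfold dimsSel selC dimsSel
  apply PySem.List.foldl_congr_mem
  intro acc j hj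
  have h := getD_dimsC a (List.mem_range.mp hj)
  simp only [h]
  rfl

theorem Cc_def (a : List (Int × Int)) (i : Nat) :
    Cc a i = if (selC a i).2 = -1 then [dA a i]
             else Cc a ((selC a i).2.toNat) ++ [dA a i] := by
  have hlen : (dimsC a i).length = i := length_dimsC a i
  have hinv := sel_inv a (Lm a) i
  rw [show dimsSel a (Lm a) i = selC a i from rfl] at hinv
  show (dimsC a (i+1)).getD i [] = _
  rw [dimsC_succ, sel_dimsC]
  have key : ∀ (x : List (Int × Int)), (dimsC a i ++ [x]).getD i [] = x := by
    intro x
    have h0 : (dimsC a i ++ [x]).getD ((dimsC a i).length) [] = x := by simp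
    rwa [hlen] at h0
  rw [key]
  rcases hinv with ⟨h2, _⟩ | ⟨hnn, h2, _⟩
  · rw [if_pos h2, if_pos h2]
  · have hne : (selC a i).2 ≠ -1 := by intro he; rw [he] at hnn; omega
    rw [if_neg hne, if_neg hne, getD_dimsC a h2]

theorem Cc_getLast? (a : List (Int × Int)) (i : Nat) : (Cc a i).getLast? = some (dA a i) := by
  rw [Cc_def]; split <;> simp

theorem Lm_eq_sel1 (a : List (Int × Int)) (i : Nat) : Lm a i = (selC a i).1 := by
  have hinv := sel_inv a (Lm a) i
  rw [show dimsSel a (Lm a) i = selC a i from rfl] at hinv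
  unfold Lm
  rw [Cc_def]
  rcases hinv with ⟨h2, h1⟩ | ⟨hnn, h2, h1⟩
  · rw [if_pos h2, h1]; rfl
  · have hne : (selC a i).2 ≠ -1 := by intro he; rw [he] at hnn; omega
    rw [if_neg hne, h1]
    unfold Lm
    simp [List.length_append]

theorem enumerate_eq (xs : List (Int × Int)) :
    PySem.List.enumerate xs = (List.range xs.length).map (fun (j : Nat) => ((j : Int), dA xs j)) := by
  rw [PySem.List.enumerate_eq_map_pyRange xs (0, 0), PySem.List.len_eq,
    PySem.List.pyRange_zero_nat, List.map_map]
  have hf : ((fun j => (j, PySem.List.pyGetD xs j ((0 : Int), (0 : Int)))) ∘ fun (k : Nat) => ((k : Int)))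
      = fun (j : Nat) => ((j : Int), dA xs j) := by
    funext j
    simp [Function.comp, dA, PySem.List.pyGetD_natCast]
  rw [hf]

theorem A_inner (a : List (Int × Int)) (k : Nat) :
    ((List.range k).map (fun (j : Nat) => ((j : Int), Cc a j))).foldl (dimsAInner (dA a k)) ([dA a k], 1)
      = (Cc a k, (selC a k).1) := by
  rw [List.foldl_map]
  have hinit : (([dA a k], (1 : Int)) : List (Int × Int) × Int)
      = (fun (s : Int × Int) => (if s.2 = -1 then [dA a k] else Cc a s.2.toNat ++ [dA a k], s.1)) (1, -1) := by
    simp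
  rw [hinit,
    foldl_hom_mem (fun (s : Int × Int) => (if s.2 = -1 then [dA a k] else Cc a s.2.toNat ++ [dA a k], s.1))
      _ (fun s j => if (dA a j).2 ≤ (dA a k).2 ∧ Lm a j + 1 > s.1 then (Lm a j + 1, (j : Int)) else s)
      (List.range k) (fun _ => True) (fun _ _ => trivial) ?_ (1, -1)]
  · rw [show (List.range k).foldl
        (fun s j => if (dA a j).2 ≤ (dA a k).2 ∧ Lm a j + 1 > s.1 then (Lm a j + 1, (j : Int)) else s)
        (1, -1) = selC a k from rfl]
    rw [← Cc_def]
  · intro s j _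
    unfold dimsAInner
    rw [PySem.List.pyGet?_neg_one, Cc_getLast? a j]
    simp only [Lm]
    by_cases hc : (dA a j).2 ≤ (dA a k).2 <;>
      by_cases hl : ((Cc a j).length : Int) + 1 > s.1 <;>
        simp [hc, hl, List.length_append, show ((j : Nat) : Int) ≠ -1 from by omega]

theorem A_dict (a : List (Int × Int)) (k : Nat) :
    ((List.range k).map (fun (j : Nat) => ((j : Int), dA a j))).foldl dimsAStep PySem.Dict.empty
      = PySem.Dict.mk ((List.range k).map (fun (j : Nat) => ((j : Int), Cc a j))) := by
  induction k with
  | zero => rfl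
  | succ k ih =>
    rw [List.range_succ, List.map_append, List.foldl_append, ih]
    simp only [List.map_cons, List.map_nil, List.foldl_cons, List.foldl_nil]
    unfold dimsAStep
    apply PySem.Dict.ext
    have hnc : (PySem.Dict.mk ((List.range k).map (fun (j : Nat) => ((j : Int), Cc a j)))).contains
        ((k : Nat) : Int) = false := by
      rw [PySem.Dict.contains_mk]
      simp only [List.any_eq_false]
      intro p hp
      obtain ⟨j, hj, rfl⟩ := List.mem_map.mp hp
      have : j < k := List.mem_range.mp hj
      simp only [beq_iff_eq]
      omega
    rw [PySem.Dict.items_insert_of_not_contains _ _ hnc]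
    rw [show (PySem.Dict.mk ((List.range k).map (fun (j : Nat) => ((j : Int), Cc a j)))).items
        = (List.range k).map (fun (j : Nat) => ((j : Int), Cc a j)) from rfl]
    rw [show ((((k : Nat) : Int), dA a k) : Int × (Int × Int)).2 = dA a k from rfl]
    rw [A_inner a k]
    simp

theorem bidx_succ (a : List (Int × Int)) (k : Nat) :
    bidx a (k+1) = if Lm a k > Lm a (bidx a k) then k else bidx a k := by
  unfold bidx
  rw [List.range_succ, List.foldl_append]
  rfl

theorem A_final (a : List (Int × Int)) (k : Nat) (hk : 1 ≤ k) :
    ((List.range k).map (fun (j : Nat) => ((j : Int), Cc a j))).foldl dimsAFin (none, none)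
      = (some (Cc a (bidx a k)), some (Lm a (bidx a k))) := by
  induction k, hk using Nat.le_induction with
  | base =>
    show dimsAFin (none, none) (((0 : Nat) : Int), Cc a 0) = _
    have hb : bidx a 1 = 0 := by
      unfold bidx
      simp [List.range_succ]
    rw [hb]
    unfold dimsAFin
    simp [Lm]
  | succ k hk ih =>
    rw [List.range_succ, List.map_append, List.foldl_append, ih]
    simp only [List.map_cons, List.map_nil, List.foldl_cons, List.foldl_nil]
    unfold dimsAFin
    simp only
    rw [bidx_succ]
    by_cases h : Lm a k > Lm a (bidx a k)
    · rw [if_pos (by simpa [Lm] using h), if_pos h]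
      rfl
    · rw [if_neg (by simpa [Lm] using h), if_neg h]

theorem getD_mid (M R : List Int) (x d : Int) : (M ++ x :: R).getD M.length d = x := by simp

theorem set_mid (M R : List Int) (x v : Int) : (M ++ x :: R).set M.length v = M ++ v :: R := by simp

theorem B_tab (a : List (Int × Int)) (n : Nat) (i : Nat) (hi : i ≤ n) :
    (List.range i).foldl (dimsBOuter a) (List.replicate n 1, List.replicate n (-1))
      = ((List.range i).map (Lm a) ++ List.replicate (n-i) 1,
         (List.range i).map (fun j => (selC a j).2) ++ List.replicate (n-i) (-1)) := by
  induction i with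
  | zero => simp
  | succ i ih =>
    have hi' : i ≤ n := Nat.le_of_succ_le hi
    have hin : i < n := hi
    rw [List.range_succ, List.foldl_append, ih hi']
    simp only [List.foldl_cons, List.foldl_nil]
    unfold dimsBOuter
    have hrep1 : List.replicate (n-i) (1 : Int) = 1 :: List.replicate (n-(i+1)) 1 := by
      rw [show n - i = (n-(i+1))+1 from by omega, List.replicate_succ]
    have hrep2 : List.replicate (n-i) (-1 : Int) = -1 :: List.replicate (n-(i+1)) (-1) := by
      rw [show n - i = (n-(i+1))+1 from by omega, List.replicate_succ]
    rw [hrep1, hrep2]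
    have hlenM : ((List.range i).map (Lm a)).length = i := by simp
    have hlenP : ((List.range i).map (fun j => (selC a j).2)).length = i := by simp
    have hinit : (((List.range i).map (Lm a) ++ (1 : Int) :: List.replicate (n-(i+1)) 1,
        (List.range i).map (fun j => (selC a j).2) ++ (-1 : Int) :: List.replicate (n-(i+1)) (-1))
         : List Int × List Int)
        = (fun (s : Int × Int) => ((List.range i).map (Lm a) ++ s.1 :: List.replicate (n-(i+1)) 1,
            (List.range i).map (fun j => (selC a j).2) ++ s.2 :: List.replicate (n-(i+1)) (-1))) (1, -1) := rfl
    rw [hinit,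
      foldl_hom_mem (fun (s : Int × Int) => ((List.range i).map (Lm a) ++ s.1 :: List.replicate (n-(i+1)) 1,
          (List.range i).map (fun j => (selC a j).2) ++ s.2 :: List.replicate (n-(i+1)) (-1)))
        _ (fun s j => if (dA a j).2 ≤ (dA a i).2 ∧ Lm a j + 1 > s.1 then (Lm a j + 1, (j : Int)) else s)
        (List.range i) (fun j => j < i) (fun j hj => List.mem_range.mp hj) ?_ (1, -1)]
    · rw [show (List.range i).foldl
          (fun s j => if (dA a j).2 ≤ (dA a i).2 ∧ Lm a j + 1 > s.1 then (Lm a j + 1, (j : Int)) else s)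
          (1, -1) = selC a i from rfl]
      simp [Lm_eq_sel1 a i]
    · intro s j hj
      unfold dimsBInner
      simp only
      have hgj : ((List.range i).map (Lm a) ++ s.1 :: List.replicate (n-(i+1)) 1).getD j 0 = Lm a j := by
        rw [List.getD_append _ _ _ _ (by rw [hlenM]; exact hj)]
        exact PySem.List.getD_map_range (Lm a) i j 0 hj
      have hgi : ((List.range i).map (Lm a) ++ s.1 :: List.replicate (n-(i+1)) 1).getD i 0 = s.1 := by
        have h0 := getD_mid ((List.range i).map (Lm a)) (List.replicate (n-(i+1)) 1) s.1 0
        rwa [hlenM] at h0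
      rw [hgj, hgi]
      rw [show a.getD j (0,0) = dA a j from rfl, show a.getD i (0,0) = dA a i from rfl]
      by_cases hc : (dA a j).2 ≤ (dA a i).2 ∧ Lm a j + 1 > s.1
      · rw [if_pos hc, if_pos hc]
        have hs1 : ((List.range i).map (Lm a) ++ s.1 :: List.replicate (n-(i+1)) 1).set i (Lm a j + 1)
            = (List.range i).map (Lm a) ++ (Lm a j + 1) :: List.replicate (n-(i+1)) 1 := by
          have h0 := set_mid ((List.range i).map (Lm a)) (List.replicate (n-(i+1)) 1) s.1 (Lm a j + 1)
          rwa [hlenM] at h0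
        have hs2 : (((List.range i).map (fun j => (selC a j).2)) ++ s.2 :: List.replicate (n-(i+1)) (-1)).set i ((j : Int))
            = ((List.range i).map (fun j => (selC a j).2)) ++ ((j : Int)) :: List.replicate (n-(i+1)) (-1) := by
          have h0 := set_mid ((List.range i).map (fun j => (selC a j).2)) (List.replicate (n-(i+1)) (-1)) s.2 ((j : Int))
          rwa [hlenP] at h0
        simp [hs1, hs2]
      · rw [if_neg hc, if_neg hc]

theorem B_best_aux (a : List (Int × Int)) (n : Nat) (l : List Nat) (hl : ∀ x ∈ l, x < n) :
    ∀ (b : Nat), b < n →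
    (l.foldl (dimsBBest ((List.range n).map (Lm a))) b
      = l.foldl (fun b i => if Lm a i > Lm a b then i else b) b)
    ∧ l.foldl (fun b i => if Lm a i > Lm a b then i else b) b < n := by
  induction l with
  | nil => exact fun b hb => ⟨rfl, hb⟩
  | cons x xs ih =>
    intro b hb
    have hx : x < n := hl x List.mem_cons_self
    have hstep : dimsBBest ((List.range n).map (Lm a)) b x = if Lm a x > Lm a b then x else b := by
      unfold dimsBBest
      rw [PySem.List.getD_map_range (Lm a) n x 0 hx, PySem.List.getD_map_range (Lm a) n b 0 hb]
    simp only [List.foldl_cons, hstep]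
    exact ih (fun y hy => hl y (List.mem_cons_of_mem _ hy)) _ (by split <;> [exact hx; exact hb])

theorem walk_neg (a : List (Int × Int)) (P : List Int) (fuel : Nat) (acc : List (Int × Int)) :
    dimsWalk a P fuel (-1) acc = acc := by
  cases fuel <;> simp [dimsWalk]

theorem B_walk (a : List (Int × Int)) (n : Nat) :
    ∀ (fuel j : Nat) (acc : List (Int × Int)), j < n → j < fuel →
    dimsWalk a ((List.range n).map (fun j => (selC a j).2)) fuel ((j : Int)) acc
      = acc ++ (Cc a j).reverse := by
  intro fuel
  induction fuel with
  | zero => intro j acc _ h; omega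
  | succ fuel ih =>
    intro j acc hjn hjf
    rw [dimsWalk]
    rw [if_neg (by omega)]
    rw [show ((j : Nat) : Int).toNat = j from by omega]
    rw [PySem.List.getD_map_range (fun j => (selC a j).2) n j (-1) hjn]
    rw [show a.getD j (0,0) = dA a j from rfl]
    have hinv := sel_inv a (Lm a) j
    rw [show dimsSel a (Lm a) j = selC a j from rfl] at hinv
    rcases hinv with ⟨h2, _⟩ | ⟨hnn, h2, _⟩
    · rw [h2, walk_neg]
      rw [Cc_def a j, if_pos h2]
      simp
    · have hne : (selC a j).2 ≠ -1 := by intro he; rw [he] at hnn; omega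
      rw [← Int.toNat_of_nonneg hnn]
      rw [ih (selC a j).2.toNat (acc ++ [dA a j]) (by omega) (by omega)]
      rw [Cc_def a j, if_neg hne]
      simp

theorem A_char (indices : List (Int × Int)) (h : 0 < (PySem.List.sorted indices (fun x => x.1)).length) :
    double_index_max_subsequence indices
      = Cc (PySem.List.sorted indices (fun x => x.1))
          (bidx (PySem.List.sorted indices (fun x => x.1))
                (PySem.List.sorted indices (fun x => x.1)).length) := by
  simp only [double_index_max_subsequence]
  rw [enumerate_eq, A_dict]
  rw [show (PySem.Dict.mk ((List.range (PySem.List.sorted indices (fun x => x.1)).length).map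
      (fun (j : Nat) => ((j : Int), Cc (PySem.List.sorted indices (fun x => x.1)) j)))).items
      = (List.range (PySem.List.sorted indices (fun x => x.1)).length).map
        (fun (j : Nat) => ((j : Int), Cc (PySem.List.sorted indices (fun x => x.1)) j)) from rfl]
  rw [A_final _ _ h]
  rfl

theorem B_char (indices : List (Int × Int)) (h : 0 < (PySem.List.sorted indices (fun x => x.1)).length) :
    double_index_max_subsequence_alt indices
      = Cc (PySem.List.sorted indices (fun x => x.1))
          (bidx (PySem.List.sorted indices (fun x => x.1))
                (PySem.List.sorted indices (fun x => x.1)).length) := by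
  simp only [double_index_max_subsequence_alt]
  rw [if_neg (by omega)]
  rw [B_tab _ _ _ le_rfl]
  set a := PySem.List.sorted indices (fun x => x.1) with ha
  set n := a.length with hn
  simp only [Nat.sub_self, List.replicate_zero, List.append_nil]
  have hbest := B_best_aux a n (List.range n) (fun x hx => List.mem_range.mp hx) 0 h
  rw [hbest.1]
  have hblt : (List.range n).foldl (fun b i => if Lm a i > Lm a b then i else b) 0 < n := hbest.2
  rw [show (List.range n).foldl (fun b i => if Lm a i > Lm a b then i else b) 0 = bidx a n from rfl] at hblt ⊢
  rw [B_walk a n n (bidx a n) [] hblt (by omega)]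
  simp

-- ===== VERDICT (by name: the statement is the Claim_ definition above) =====
theorem double_index_max_subsequence_spec : Claim_equal_double_index_max_subsequence := by
  intro indices _ hpre
  unfold Spec_double_index_max_subsequence
  have hlen : 0 < (PySem.List.sorted indices (fun x => x.1)).length := by
    rw [PySem.List.length_sorted]
    cases indices with
    | nil => exact absurd rfl hpre
    | cons x xs => simp
  rw [A_char indices hlen, B_char indices hlen]
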